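-- pv_equiv track=rewrite | github.com/epigen-UCSD/epigen_ucsd_django | setqc_app/views.py | grouplibraries
-- ===== SOURCE A (Python) =====
-- from itertools import groupby
-- from operator import itemgetter
--
-- def groupnumber(datalist):
--     ranges = []
--     for k, g in groupby(enumerate(datalist), lambda x: x[0]-x[1]):
--         group = (map(itemgetter(1), g))
--         group = list(map(int, group))
--         ranges.append((group[0], group[-1]))
--     return ranges
--
-- def grouplibraries(librarieslist):
--     groupedlibraries = []
--     presuffix_number = {}
--     for item in librarieslist:
--         splititem = item.split('_', 2)
--         if len(splititem) == 1:
--             groupedlibraries.append(item)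
--         else:
--             prefix = item.split('_', 2)[0]
--             try:
--                 suffix = item.split('_', 2)[2]
--             except IndexError as e:
--                 suffix = ''
--             presuffix = ':'.join([prefix, suffix])
--             if presuffix not in presuffix_number.keys():
--                 presuffix_number[presuffix] = []
--             presuffix_number[presuffix].append(int(item.split('_', 2)[1]))
--
--     for k, v in presuffix_number.items():
--         prefix = k.split(':')[0]
--         suffix = k.split(':')[1]
--         ranges = groupnumber(sorted(v))
--         if not suffix:
--             for x in ranges:
--                 if x[0] == x[1]:
--                     groupedlibraries.append('_'.join([prefix, str(x[0])]))
--                 else: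
--                     start = '_'.join([prefix, str(x[0])])
--                     end = '_'.join([prefix, str(x[1])])
--                     groupedlibraries.append('-'.join([start, end]))
--         else:
--             for x in ranges:
--                 if x[0] == x[1]:
--                     groupedlibraries.append(
--                         '_'.join([prefix, str(x[0]), suffix]))
--                 else:
--                     start = '_'.join([prefix, str(x[0]), suffix])
--                     end = '_'.join([prefix, str(x[1]), suffix])
--                     groupedlibraries.append('-'.join([start, end]))
--     return ','.join(groupedlibraries)
-- ===== SOURCE B (Python) =====
-- def _fmt(pre, n, suf):
--     return '_'.join([pre, str(n)] + ([suf] if suf else []))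
--
--
-- def _ranges(xs):
--     # divide and conquer: ranges of each half, gluing the boundary runs
--     # when the right half starts exactly one past the end of the left half
--     if not xs:
--         return []
--     if len(xs) == 1:
--         return [(xs[0], xs[0])]
--     mid = len(xs) // 2
--     left, right = _ranges(xs[:mid]), _ranges(xs[mid:])
--     (a, b), (c, d) = left[-1], right[0]
--     if c == b + 1:
--         return left[:-1] + [(a, d)] + right[1:]
--     return left + right
--
--
-- def grouplibraries(librarieslist):
--     out = []
--     groups = {}
--     for item in librarieslist:
--         parts = item.split('_', 2)
--         if len(parts) == 1:
--             out.append(item)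
--         else:
--             key = ':'.join([parts[0], parts[2] if len(parts) > 2 else ''])
--             groups.setdefault(key, []).append(int(parts[1]))
--     for key, nums in groups.items():
--         fields = key.split(':')
--         pre, suf = fields[0], fields[1]
--         for lo, hi in _ranges(sorted(nums)):
--             first = _fmt(pre, lo, suf)
--             out.append(first if lo == hi else '-'.join([first, _fmt(pre, hi, suf)]))
--     return ','.join(out)
-- ===== Notes on version B (the rewrite author's own statement) =====
-- stated objective: alternative
-- what changed: B computes the consecutive-number ranges by a recursive divide-and-conquer that splits the sorted list in half, recurses, and glues the boundary runs when the right half starts one past the left half's end, instead of A's itertools.groupby index-difference scan; the dict is built with setdefault and both formatting branches are unified into one fmt helper; Pre_ excludes items whose middle '_'-field is not a valid int literal, on which A raises ValueError.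
import Mathlib
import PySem

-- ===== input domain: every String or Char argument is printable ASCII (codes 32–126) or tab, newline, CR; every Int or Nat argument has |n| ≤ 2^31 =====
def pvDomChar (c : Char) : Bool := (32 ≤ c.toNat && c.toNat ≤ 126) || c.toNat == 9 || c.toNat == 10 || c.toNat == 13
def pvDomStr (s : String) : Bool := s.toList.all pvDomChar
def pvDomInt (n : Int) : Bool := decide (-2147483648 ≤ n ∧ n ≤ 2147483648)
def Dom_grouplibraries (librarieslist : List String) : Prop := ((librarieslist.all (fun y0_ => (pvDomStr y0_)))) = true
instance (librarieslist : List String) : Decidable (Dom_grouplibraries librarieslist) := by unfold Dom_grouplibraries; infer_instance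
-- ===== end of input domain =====

-- B replaces A's itertools.groupby index-difference scan with a recursive divide-and-conquer
-- that halves the sorted list and glues the boundary runs, builds the dict with setdefault,
-- and unifies the two formatting branches into one fmt helper (objective: alternative).

-- ===== PORT A =====
-- enumerate(datalist) starting at i
def pyEnumerate (i : Int) : List Int → List (Int × Int)
  | [] => []
  | x :: xs => (i, x) :: pyEnumerate (i + 1) xs

-- itertools.groupby body: current key k, current group g held in REVERSE
def gbGo (k : Int) (g : List (Int × Int)) : List (Int × Int) → List (List (Int × Int))
  | [] => [g.reverse]
  | y :: ys => if y.1 - y.2 = k then gbGo k (y :: g) ys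
               else g.reverse :: gbGo (y.1 - y.2) [y] ys

-- itertools.groupby(pairs, key = lambda x: x[0] - x[1])
def pyGroupby : List (Int × Int) → List (List (Int × Int))
  | [] => []
  | x :: xs => gbGo (x.1 - x.2) [x] xs

def groupnumber (datalist : List Int) : List (Int × Int) :=
  (pyGroupby (pyEnumerate 0 datalist)).foldl
    (fun ranges g => ranges ++ [((g.headD (0, 0)).2, (g.getLastD (0, 0)).2)]) []

def grouplibraries (librarieslist : List String) : String :=
  let st := librarieslist.foldl
    (fun (st : List String × PySem.Dict String (List Int)) item =>
      let splititem := (PySem.Str.splitMax? item "_" 2).getD []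
      if splititem.length = 1 then (st.1 ++ [item], st.2)
      else
        let pre := (PySem.List.pyGet? ((PySem.Str.splitMax? item "_" 2).getD []) 0).getD ""
        -- try: split[2] except IndexError: ''  → pyGet? … |>.getD ""
        let suf := (PySem.List.pyGet? ((PySem.Str.splitMax? item "_" 2).getD []) 2).getD ""
        let presuffix := PySem.Str.join ":" [pre, suf]
        let d := if st.2.keys.contains presuffix then st.2 else st.2.insert presuffix []
        -- int() raises ValueError on a bad literal: excluded by Pre_; the port defaults to 0 there
        (st.1, d.insert presuffix (d.getD presuffix []
          ++ [(PySem.Int.ofStr? ((PySem.List.pyGet? ((PySem.Str.splitMax? item "_" 2).getD []) 1).getD "")).getD 0])))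
    ([], PySem.Dict.empty)
  let grouped := st.2.items.foldl
    (fun grouped kv =>
      let pre := (PySem.List.pyGet? ((PySem.Str.split? kv.1 ":").getD []) 0).getD ""
      let suf := (PySem.List.pyGet? ((PySem.Str.split? kv.1 ":").getD []) 1).getD ""
      let ranges := groupnumber (PySem.List.sorted kv.2 (fun x => x) false)
      if suf = "" then
        ranges.foldl (fun g x =>
          g ++ [if x.1 = x.2 then PySem.Str.join "_" [pre, PySem.Int.toStr x.1]
                else PySem.Str.join "-" [PySem.Str.join "_" [pre, PySem.Int.toStr x.1],
                                         PySem.Str.join "_" [pre, PySem.Int.toStr x.2]]]) grouped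
      else
        ranges.foldl (fun g x =>
          g ++ [if x.1 = x.2 then PySem.Str.join "_" [pre, PySem.Int.toStr x.1, suf]
                else PySem.Str.join "-" [PySem.Str.join "_" [pre, PySem.Int.toStr x.1, suf],
                                         PySem.Str.join "_" [pre, PySem.Int.toStr x.2, suf]]]) grouped)
    st.1
  PySem.Str.join "," grouped

-- ===== PORT B =====
-- _ranges: divide and conquer.  xs[:mid]/xs[mid:] are exact as take/drop (0 ≤ mid);
-- left[-1]/right[0]/left[:-1]/right[1:] are exact as getLastD/headD/dropLast/tail since
-- both recursive results are nonempty here.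
def dcRanges (l : List Int) : List (Int × Int) :=
  if l = [] then []
  else if l.length = 1 then [(l.headD 0, l.headD 0)]
  else
    let m := l.length / 2
    let left := dcRanges (l.take m)
    let right := dcRanges (l.drop m)
    let ab := left.getLastD (0, 0)
    let cd := right.headD (0, 0)
    if cd.1 = ab.2 + 1 then left.dropLast ++ (ab.1, cd.2) :: right.tail
    else left ++ right
termination_by l.length
decreasing_by
  all_goals
    rename_i h1 h2
    have h0 : l.length ≠ 0 := by simpa [List.length_eq_zero_iff] using h1
    simp [List.length_take]
    omega

-- _fmt
def fmt (pre : String) (n : Int) (suf : String) : String :=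
  PySem.Str.join "_" ([pre, PySem.Int.toStr n] ++ (if suf = "" then [] else [suf]))

def grouplibraries_alt (librarieslist : List String) : String :=
  let st := librarieslist.foldl
    (fun (st : List String × PySem.Dict String (List Int)) item =>
      let parts := (PySem.Str.splitMax? item "_" 2).getD []
      if parts.length = 1 then (st.1 ++ [item], st.2)
      else
        let key := PySem.Str.join ":" [(PySem.List.pyGet? parts 0).getD "",
          if 2 < parts.length then (PySem.List.pyGet? parts 2).getD "" else ""]
        -- groups.setdefault(key, []).append(int(parts[1])); int() ValueError excluded by Pre_
        (st.1, st.2.modify key []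
          (· ++ [(PySem.Int.ofStr? ((PySem.List.pyGet? parts 1).getD "")).getD 0])))
    ([], PySem.Dict.empty)
  let out := st.2.items.foldl
    (fun out kv =>
      let fields := (PySem.Str.split? kv.1 ":").getD []
      let pre := (PySem.List.pyGet? fields 0).getD ""
      let suf := (PySem.List.pyGet? fields 1).getD ""
      (dcRanges (PySem.List.sorted kv.2 (fun x => x) false)).foldl (fun out r =>
        let first := fmt pre r.1 suf
        out ++ [if r.1 = r.2 then first else PySem.Str.join "-" [first, fmt pre r.2 suf]]) out)
    st.1
  PySem.Str.join "," out

-- ===== PRECONDITION & SPEC =====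
-- Pre_ excludes exactly the items with at least one '_' whose middle field is not a valid
-- Python int literal: on those A raises ValueError from int().
def Pre_grouplibraries (librarieslist : List String) : Prop :=
  ∀ item ∈ librarieslist,
    ((PySem.Str.splitMax? item "_" 2).getD []).length = 1 ∨
    (PySem.Int.ofStr? ((PySem.List.pyGet? ((PySem.Str.splitMax? item "_" 2).getD []) 1).getD "")).isSome = true
instance (librarieslist : List String) : Decidable (Pre_grouplibraries librarieslist) := by
  unfold Pre_grouplibraries; infer_instance

def pvWitness_grouplibraries : List String := ["SC_1_rep", "SC_2_rep", "plain", "SC_5", "SC_4"]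

def Spec_grouplibraries (librarieslist : List String) (out : String) : Prop :=
  out = grouplibraries_alt librarieslist
instance (librarieslist : List String) (out : String) : Decidable (Spec_grouplibraries librarieslist out) := by
  unfold Spec_grouplibraries; infer_instance

-- ===== CLAIM (what is proved, stated in full; the proofs are below) =====
def Claim_equal_grouplibraries : Prop := ∀ (librarieslist : List String), Dom_grouplibraries librarieslist → Pre_grouplibraries librarieslist → Spec_grouplibraries librarieslist (grouplibraries librarieslist)

-- ===== LEMMAS AND PROOFS =====

-- reference scan: explicit start/prev run compression, the common target of both ports
def runsGo (res : List (Int × Int)) (start prev : Int) : List Int → List (Int × Int)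
  | [] => res ++ [(start, prev)]
  | x :: xs => if x = prev + 1 then runsGo res start x xs
               else runsGo (res ++ [(start, prev)]) x x xs

def runs : List Int → List (Int × Int)
  | [] => []
  | x :: xs => runsGo [] x x xs

def endOf (p : Int) : List Int → Int
  | [] => p
  | x :: xs => if x = p + 1 then endOf x xs else p

def restOf (p : Int) : List Int → List (Int × Int)
  | [] => []
  | x :: xs => if x = p + 1 then restOf x xs else runsGo [] x x xs

lemma runsGo_res (l : List Int) : ∀ res s p,
    runsGo res s p l = res ++ runsGo [] s p l := by
  induction l with
  | nil => intro res s p; simp [runsGo]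
  | cons x xs ih =>
    intro res s p
    by_cases h : x = p + 1 <;> simp only [runsGo, h, reduceIte]
    · exact ih res s (p + 1)
    · rw [ih (res ++ [(s, p)]) x x, ih ([] ++ [(s, p)]) x x]; simp

lemma runsGo_shape (l : List Int) : ∀ s p,
    runsGo [] s p l = (s, endOf p l) :: restOf p l := by
  induction l with
  | nil => intro s p; simp [runsGo, endOf, restOf]
  | cons x xs ih =>
    intro s p
    by_cases h : x = p + 1 <;> simp only [runsGo, endOf, restOf, h, reduceIte]
    · exact ih s (p + 1)
    · rw [runsGo_res]; simp

lemma runsGo_lastEnd (l : List Int) : ∀ s p,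
    ((runsGo [] s p l).getLastD (0, 0)).2 = l.getLastD p := by
  induction l with
  | nil => intro s p; simp [runsGo]
  | cons x xs ih =>
    intro s p
    by_cases h : x = p + 1 <;> simp only [runsGo, h, reduceIte]
    · rw [ih s (p + 1)]; simp [List.getLastD_eq_getLast?, List.getLast?_cons]
    · rw [runsGo_res]
      have hsh := runsGo_shape xs x x
      have := ih x x
      rw [hsh] at this ⊢
      simp only [List.getLastD_eq_getLast?, List.getLast?_append, List.getLast?_cons] at this ⊢
      simpa using this

lemma runsGo_append (xs : List Int) : ∀ s p y ys,
    runsGo [] s p (xs ++ y :: ys) =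
      if y = xs.getLastD p + 1
      then (runsGo [] s p xs).dropLast ++
           (((runsGo [] s p xs).getLastD (0, 0)).1,
            ((runsGo [] y y ys).headD (0, 0)).2) :: (runsGo [] y y ys).tail
      else runsGo [] s p xs ++ runsGo [] y y ys := by
  induction xs with
  | nil =>
    intro s p y ys
    simp only [List.nil_append, List.getLastD]
    by_cases h : y = p + 1 <;> simp only [runsGo, h, reduceIte]
    · rw [runsGo_shape ys s (p + 1), runsGo_shape ys (p + 1) (p + 1)]
      simp
    · rw [runsGo_res]
  | cons x xs' ih =>
    intro s p y ys
    have hlast : (x :: xs').getLastD p = xs'.getLastD x := by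
      simp [List.getLastD_eq_getLast?, List.getLast?_cons]
    by_cases h : x = p + 1
    · simp only [List.cons_append, runsGo]
      rw [if_pos h, if_pos h, hlast]
      exact ih s x y ys
    · simp only [List.cons_append, runsGo]
      rw [if_neg h, if_neg h, hlast,
          runsGo_res (xs' ++ y :: ys) ([] ++ [(s, p)]) x x, runsGo_res xs' ([] ++ [(s, p)]) x x,
          ih x x y ys]
      have hsh := runsGo_shape xs' x x
      by_cases hc : y = xs'.getLastD x + 1 <;> simp only [hc, reduceIte]
      · rw [hsh]
        simp [List.getLastD_eq_getLast?, List.getLast?_cons]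
      · simp

lemma runs_append (l1 l2 : List Int) (h1 : l1 ≠ []) (h2 : l2 ≠ []) :
    runs (l1 ++ l2) =
      if l2.headD 0 = l1.getLastD 0 + 1
      then (runs l1).dropLast ++
           (((runs l1).getLastD (0, 0)).1, ((runs l2).headD (0, 0)).2) :: (runs l2).tail
      else runs l1 ++ runs l2 := by
  cases l1 with
  | nil => exact absurd rfl h1
  | cons x t1 =>
    cases l2 with
    | nil => exact absurd rfl h2
    | cons y t2 =>
      show runsGo [] x x (t1 ++ y :: t2) = _
      rw [runsGo_append t1 x x y t2]
      have hl : t1.getLastD x = (x :: t1).getLastD 0 := by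
        simp [List.getLastD_eq_getLast?, List.getLast?_cons]
      have hh : (y :: t2).headD 0 = y := rfl
      rw [hl, hh]
      rfl

lemma runs_head1 (l : List Int) (h : l ≠ []) :
    ((runs l).headD (0, 0)).1 = l.headD 0 := by
  cases l with
  | nil => exact absurd rfl h
  | cons x t => show ((runsGo [] x x t).headD (0,0)).1 = x; rw [runsGo_shape]; rfl

lemma runs_last2 (l : List Int) (h : l ≠ []) :
    ((runs l).getLastD (0, 0)).2 = l.getLastD 0 := by
  cases l with
  | nil => exact absurd rfl h
  | cons x t =>
    show ((runsGo [] x x t).getLastD (0,0)).2 = _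
    rw [runsGo_lastEnd t x x]
    simp [List.getLastD_eq_getLast?, List.getLast?_cons]

lemma dcRanges_step (l : List Int) (he : l ≠ []) (h1 : l.length ≠ 1) :
    dcRanges l =
      if ((dcRanges (l.drop (l.length / 2))).headD (0, 0)).1
           = ((dcRanges (l.take (l.length / 2))).getLastD (0, 0)).2 + 1
      then (dcRanges (l.take (l.length / 2))).dropLast ++
           (((dcRanges (l.take (l.length / 2))).getLastD (0, 0)).1,
            ((dcRanges (l.drop (l.length / 2))).headD (0, 0)).2) ::
             (dcRanges (l.drop (l.length / 2))).tail
      else dcRanges (l.take (l.length / 2)) ++ dcRanges (l.drop (l.length / 2)) := by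
  rw [dcRanges, if_neg he, if_neg h1]

lemma dcRanges_eq_runs (l : List Int) : dcRanges l = runs l := by
  induction hn : l.length using Nat.strong_induction_on generalizing l with
  | _ n ih =>
    by_cases he : l = []
    · subst he; simp [dcRanges, runs]
    · by_cases h1 : l.length = 1
      · match l, h1 with
        | [x], _ => simp [dcRanges, runs, runsGo]
      · have h0 : l.length ≠ 0 := by simpa [List.length_eq_zero_iff] using he
        have h2 : 2 ≤ l.length := by omega
        rw [dcRanges_step l he h1]
        set m := l.length / 2 with hm
        have hltake : (l.take m).length = m := by simp [List.length_take]; omega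
        have hldrop : (l.drop m).length = l.length - m := by simp
        have hne1 : l.take m ≠ [] := by
          intro hE; rw [hE] at hltake; simp at hltake; omega
        have hne2 : l.drop m ≠ [] := by
          intro hE; rw [hE] at hldrop; simp at hldrop; omega
        have e1 := ih (l.take m).length (by omega) (l.take m) rfl
        have e2 := ih (l.drop m).length (by omega) (l.drop m) rfl
        rw [e1, e2]
        rw [runs_head1 _ hne2, runs_last2 _ hne1]
        have hap := runs_append (l.take m) (l.drop m) hne1 hne2
        rw [List.take_append_drop] at hap
        rw [hap]

lemma fmt_empty (pre : String) (n : Int) :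
    fmt pre n "" = PySem.Str.join "_" [pre, PySem.Int.toStr n] := by
  simp [fmt]

lemma fmt_nonempty (pre : String) (n : Int) (suf : String) (h : ¬ suf = "") :
    fmt pre n suf = PySem.Str.join "_" [pre, PySem.Int.toStr n, suf] := by
  simp [fmt, h]

-- the groupby fold computes exactly the scan's ranges
lemma headD_rev (l : List (Int × Int)) (hne : l ≠ []) :
    l.reverse.headD (0, 0) = l.getLastD (0, 0) := by
  cases l with
  | nil => simp at hne
  | cons a t => simp [List.head?_reverse, List.getLastD_eq_getLast?, List.getLast?_cons]

lemma lastD_rev (l : List (Int × Int)) (hne : l ≠ []) :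
    l.reverse.getLastD (0, 0) = l.headD (0, 0) := by
  cases l with
  | nil => simp at hne
  | cons a t => simp [List.getLastD_eq_getLast?, List.getLast?_reverse]

lemma gbGo_eq_runsGo : ∀ (xs : List Int) (i start prev : Int) (g : List (Int × Int))
    (res : List (Int × Int)), g.headD (0, 0) = (i, prev) → (g.getLastD (0, 0)).2 = start →
    g ≠ [] →
    (gbGo (i - prev) g (pyEnumerate (i + 1) xs)).foldl
      (fun r grp => r ++ [((grp.headD (0, 0)).2, (grp.getLastD (0, 0)).2)]) res
      = runsGo res start prev xs := by
  intro xs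
  induction xs with
  | nil =>
    intro i start prev g res hh hl hne
    simp only [pyEnumerate, gbGo, runsGo, List.foldl]
    rw [headD_rev g hne, lastD_rev g hne, hh, hl]
  | cons x xs ih =>
    intro i start prev g res hh hl hne
    simp only [pyEnumerate, gbGo]
    by_cases hx : x = prev + 1
    · have hkey : (i + 1) - x = i - prev := by omega
      rw [if_pos hkey]
      have hstep : runsGo res start prev (x :: xs) = runsGo res start x xs := by
        simp [runsGo, hx]
      rw [hstep, ← hkey]
      have hg : ((i + 1, x) :: g).getLastD (0, 0) = g.getLastD (0, 0) := by
        cases g with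
        | nil => simp at hne
        | cons a t => simp [List.getLastD_eq_getLast?, List.getLast?_cons]
      exact ih (i + 1) start x ((i + 1, x) :: g) res rfl (by rw [hg, hl]) (by simp)
    · have hkey : ¬ ((i + 1) - x = i - prev) := by omega
      rw [if_neg hkey]
      have hstep : runsGo res start prev (x :: xs) = runsGo (res ++ [(start, prev)]) x x xs := by
        simp [runsGo, hx]
      rw [hstep]
      simp only [List.foldl_cons]
      rw [headD_rev g hne, lastD_rev g hne, hh, hl]
      exact ih (i + 1) x x [(i + 1, x)] (res ++ [(start, prev)]) rfl rfl (by simp)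

lemma groupnumber_eq_runs (xs : List Int) : groupnumber xs = runs xs := by
  cases xs with
  | nil => rfl
  | cons x t =>
    show (gbGo (0 - x) [(0, x)] (pyEnumerate (0 + 1) t)).foldl _ [] = runsGo [] x x t
    exact gbGo_eq_runsGo t 0 x x [(0, x)] [] rfl rfl (by simp)

-- A's try/except suffix lookup equals B's length-guarded one
lemma suffix_if_eq (l : List String) :
    (if 2 < l.length then (PySem.List.pyGet? l 2).getD "" else "")
      = (PySem.List.pyGet? l 2).getD "" := by
  split_ifs with h
  · rfl
  · have : PySem.List.pyGet? l 2 = none := by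
      simp [PySem.List.pyGet?, PySem.List.pyIdx?]; omega
    simp [this]

-- A's "if key not in keys: d[key] = []; d[key].append(n)" equals B's setdefault/append
lemma dict_step_eq (d : PySem.Dict String (List Int)) (k : String) (n : Int) :
    (let d1 := if d.keys.contains k then d else d.insert k [];
     d1.insert k (d1.getD k [] ++ [n])) = d.modify k [] (· ++ [n]) := by
  by_cases h : d.contains k = true
  · have hk : d.keys.contains k = true := by
      simpa [List.contains_iff_mem] using (PySem.Dict.contains_iff_mem_keys (d := d) (k := k)).1 h
    simp only [hk, if_true, PySem.Dict.modify]
  · have h' : d.contains k = false := Bool.eq_false_iff.2 h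
    have hk : d.keys.contains k = false := by
      rw [Bool.eq_false_iff]
      intro hc
      exact h ((PySem.Dict.contains_iff_mem_keys (d := d) (k := k)).2
        (by simpa [List.contains_iff_mem] using hc))
    have hg : d.getD k [] = [] := PySem.Dict.getD_of_not_contains _ _ h'
    simp only [hk, Bool.false_eq_true, if_false, PySem.Dict.modify,
      PySem.Dict.getD_insert_self, PySem.Dict.insert_insert_self, hg, List.nil_append]

-- the two parse loops build the same (passthrough, dict) state
lemma parse_step_eq :
    (fun (st : List String × PySem.Dict String (List Int)) item =>
      let splititem := (PySem.Str.splitMax? item "_" 2).getD []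
      if splititem.length = 1 then (st.1 ++ [item], st.2)
      else
        let pre := (PySem.List.pyGet? ((PySem.Str.splitMax? item "_" 2).getD []) 0).getD ""
        let suf := (PySem.List.pyGet? ((PySem.Str.splitMax? item "_" 2).getD []) 2).getD ""
        let presuffix := PySem.Str.join ":" [pre, suf]
        let d := if st.2.keys.contains presuffix then st.2 else st.2.insert presuffix []
        (st.1, d.insert presuffix (d.getD presuffix []
          ++ [(PySem.Int.ofStr? ((PySem.List.pyGet? ((PySem.Str.splitMax? item "_" 2).getD []) 1).getD "")).getD 0])))
    = (fun (st : List String × PySem.Dict String (List Int)) item =>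
      let parts := (PySem.Str.splitMax? item "_" 2).getD []
      if parts.length = 1 then (st.1 ++ [item], st.2)
      else
        let key := PySem.Str.join ":" [(PySem.List.pyGet? parts 0).getD "",
          if 2 < parts.length then (PySem.List.pyGet? parts 2).getD "" else ""]
        (st.1, st.2.modify key []
          (· ++ [(PySem.Int.ofStr? ((PySem.List.pyGet? parts 1).getD "")).getD 0]))) := by
  funext st item
  simp only [suffix_if_eq]
  split
  · rfl
  · exact congrArg _ (dict_step_eq _ _ _)

-- the two formatting loops agree on every dict entry
lemma format_step_eq :
    (fun (grouped : List String) (kv : String × List Int) =>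
      let pre := (PySem.List.pyGet? ((PySem.Str.split? kv.1 ":").getD []) 0).getD ""
      let suf := (PySem.List.pyGet? ((PySem.Str.split? kv.1 ":").getD []) 1).getD ""
      let ranges := groupnumber (PySem.List.sorted kv.2 (fun x => x) false)
      if suf = "" then
        ranges.foldl (fun g x =>
          g ++ [if x.1 = x.2 then PySem.Str.join "_" [pre, PySem.Int.toStr x.1]
                else PySem.Str.join "-" [PySem.Str.join "_" [pre, PySem.Int.toStr x.1],
                                         PySem.Str.join "_" [pre, PySem.Int.toStr x.2]]]) grouped
      else
        ranges.foldl (fun g x =>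
          g ++ [if x.1 = x.2 then PySem.Str.join "_" [pre, PySem.Int.toStr x.1, suf]
                else PySem.Str.join "-" [PySem.Str.join "_" [pre, PySem.Int.toStr x.1, suf],
                                         PySem.Str.join "_" [pre, PySem.Int.toStr x.2, suf]]]) grouped)
    = (fun (out : List String) (kv : String × List Int) =>
      let fields := (PySem.Str.split? kv.1 ":").getD []
      let pre := (PySem.List.pyGet? fields 0).getD ""
      let suf := (PySem.List.pyGet? fields 1).getD ""
      (dcRanges (PySem.List.sorted kv.2 (fun x => x) false)).foldl (fun out r =>
        let first := fmt pre r.1 suf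
        out ++ [if r.1 = r.2 then first else PySem.Str.join "-" [first, fmt pre r.2 suf]]) out) := by
  funext grouped kv
  simp only [dcRanges_eq_runs, ← groupnumber_eq_runs]
  by_cases h : (PySem.List.pyGet? ((PySem.Str.split? kv.1 ":").getD []) 1).getD "" = ""
  · simp only [h]
    rw [if_pos trivial]
    refine PySem.List.foldl_congr_mem _ _ _ _ ?_
    intro acc x _
    simp only [fmt_empty]
  · rw [if_neg h]
    refine PySem.List.foldl_congr_mem _ _ _ _ ?_
    intro acc x _
    simp only [fmt_nonempty _ _ _ h]

-- ===== VERDICT (by name: the statement is the Claim_ definition above) =====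
theorem grouplibraries_spec : Claim_equal_grouplibraries := by
  intro librarieslist _ _
  unfold Spec_grouplibraries grouplibraries grouplibraries_alt
  rw [parse_step_eq, format_step_eq]
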